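-- pv_equiv track=rewrite | github.com/AndreBFarias/protocolo-ouroboros | src/dashboard/componentes/busca_roteador.py | _casar_fornecedor
-- ===== SOURCE A (Python) =====
-- def _casar_fornecedor(query_norm: str, indice: dict[str, list[str]]) -> str | None:
--     """Retorna o nome canônico do fornecedor que casa, ou None.
--
--     Estratégia: prioriza match exato (case-insensitive); se não houver,
--     usa substring com pelo menos 4 caracteres da query e devolve o
--     primeiro fornecedor cuja string contém a query inteira.
--     """
--     fornecedores = indice.get("fornecedores", [])
--     # match exato primeiro
--     for nome in fornecedores:
--         if nome.lower() == query_norm: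
--             return nome
--     # substring -- exige >=4 chars para evitar "a" casar "Banco do Brasil"
--     if len(query_norm) >= 4:
--         for nome in fornecedores:
--             if query_norm in nome.lower():
--                 return nome
--     return None
-- ===== SOURCE B (Python) =====
-- def _casar_fornecedor(query_norm: str, indice: dict[str, list[str]]) -> str | None:
--     """Single pass: return an exact (case-insensitive) match immediately;
--     remember the first substring match (query >= 4 chars) as a fallback."""
--     candidato = None
--     for nome in indice.get("fornecedores", []):
--         nome_low = nome.lower()
--         if nome_low == query_norm:
--             return nome
--         if candidato is None and len(query_norm) >= 4 and query_norm in nome_low: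
--             candidato = nome
--     return candidato
-- ===== Notes on version B (the rewrite author's own statement) =====
-- stated objective: alternative
-- what changed: Replaced A's two sequential full scans (exact-match loop, then a separate substring loop) by one fused loop that returns an exact match immediately and keeps the first substring match in a fallback accumulator returned after the loop.
import Mathlib
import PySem

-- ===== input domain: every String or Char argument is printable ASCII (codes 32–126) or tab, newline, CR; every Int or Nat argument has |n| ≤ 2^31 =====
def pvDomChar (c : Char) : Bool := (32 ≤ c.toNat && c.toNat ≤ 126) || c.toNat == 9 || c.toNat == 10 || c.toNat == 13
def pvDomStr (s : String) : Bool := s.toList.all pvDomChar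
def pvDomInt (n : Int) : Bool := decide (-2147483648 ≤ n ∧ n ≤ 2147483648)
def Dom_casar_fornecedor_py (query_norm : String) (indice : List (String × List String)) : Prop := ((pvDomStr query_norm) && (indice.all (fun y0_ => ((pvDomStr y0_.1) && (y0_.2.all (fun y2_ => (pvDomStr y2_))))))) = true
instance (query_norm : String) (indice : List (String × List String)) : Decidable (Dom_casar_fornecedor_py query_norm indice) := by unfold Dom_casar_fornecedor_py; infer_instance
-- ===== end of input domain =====

-- B fuses A's two sequential scans into one loop that returns exact matches immediately
-- and keeps the first qualifying substring match as a fallback accumulator (objective: alternative).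

-- ===== PORT A =====
-- first loop of A: exact case-insensitive match
def casarExactLoop (query_norm : String) : List String → Option String
  | [] => none
  | nome :: rest =>
    if PySem.Str.lower nome == query_norm then some nome
    else casarExactLoop query_norm rest

-- second loop of A: first name whose lowercase contains the query
def casarSubstrLoop (query_norm : String) : List String → Option String
  | [] => none
  | nome :: rest =>
    if PySem.Str.isIn query_norm (PySem.Str.lower nome) then some nome
    else casarSubstrLoop query_norm rest

def casar_fornecedor_py (query_norm : String) (indice : List (String × List String)) : Option String :=
  let fornecedores := PySem.Dict.getD (PySem.Dict.mk indice) "fornecedores" []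
  match casarExactLoop query_norm fornecedores with
  | some nome => some nome
  | none =>
    if PySem.Str.len query_norm ≥ 4 then casarSubstrLoop query_norm fornecedores
    else none

-- ===== PORT B =====
-- single fused loop with a fallback accumulator `candidato`
def casarFusedLoop (query_norm : String) (candidato : Option String) : List String → Option String
  | [] => candidato
  | nome :: rest =>
    let nome_low := PySem.Str.lower nome
    if nome_low == query_norm then some nome
    else
      casarFusedLoop query_norm
        (if candidato.isNone && (PySem.Str.len query_norm ≥ 4 : Bool) && PySem.Str.isIn query_norm nome_low
         then some nome else candidato) rest

def casar_fornecedor_py_alt (query_norm : String) (indice : List (String × List String)) : Option String :=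
  casarFusedLoop query_norm none (PySem.Dict.getD (PySem.Dict.mk indice) "fornecedores" [])

-- ===== PRECONDITION & SPEC =====
def Spec_casar_fornecedor_py (query_norm : String) (indice : List (String × List String)) (out : Option String) : Prop := out = casar_fornecedor_py_alt query_norm indice
instance (query_norm : String) (indice : List (String × List String)) (out : Option String) : Decidable (Spec_casar_fornecedor_py query_norm indice out) := by unfold Spec_casar_fornecedor_py; infer_instance

-- ===== CLAIM (what is proved, stated in full; the proofs are below) =====
def Claim_equal_casar_fornecedor_py : Prop := ∀ (query_norm : String) (indice : List (String × List String)), Dom_casar_fornecedor_py query_norm indice → Spec_casar_fornecedor_py query_norm indice (casar_fornecedor_py query_norm indice)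

-- ===== LEMMAS AND PROOFS =====

-- invariant of the fused loop: exact match wins, else the accumulator, else the substring fallback
lemma casarFusedLoop_eq (query_norm : String) (cand : Option String) (fs : List String) :
    casarFusedLoop query_norm cand fs =
      match casarExactLoop query_norm fs with
      | some nome => some nome
      | none =>
        match cand with
        | some c => some c
        | none => if PySem.Str.len query_norm ≥ 4 then casarSubstrLoop query_norm fs else none := by
  induction fs generalizing cand with
  | nil => cases cand <;> simp [casarFusedLoop, casarExactLoop, casarSubstrLoop]
  | cons nome rest ih =>
    simp only [casarFusedLoop, casarExactLoop, casarSubstrLoop]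
    by_cases hx : PySem.Str.lower nome == query_norm
    · simp [hx]
    · simp only [hx, if_false, Bool.false_eq_true]
      rw [ih]
      cases cand with
      | some c => simp
      | none =>
        cases casarExactLoop query_norm rest <;> simp <;> split_ifs <;> simp_all

-- ===== VERDICT (by name: the statement is the Claim_ definition above) =====
theorem casar_fornecedor_py_spec : Claim_equal_casar_fornecedor_py := by
  intro query_norm indice _
  unfold Spec_casar_fornecedor_py casar_fornecedor_py casar_fornecedor_py_alt
  rw [casarFusedLoop_eq]
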